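-- pv_equiv track=rewrite | github.com/basimkhajwal/ProgrammingChallenges | Code Forces/1739/c.py | solve
-- ===== SOURCE A (Python) =====
-- import math
--
-- MOD = 998244353
--
-- def solve(n):
--     if n == 0:
--         return 0, 0, 1
--     if n == 2:
--         return 1, 0, 1
--
--     # k = n choose (n/2) ways
--     # k/2 in which a gets `n`
--     # (n-2) choose (n/2) ways
--
--     ways = math.comb(n, n//2)
--
--     a_gets_n = math.comb(n-1, n//2-1)
--
--     # n and n-1 or n and n-2
--     b_win_immed = 2 * math.comb(n-2, n//2-2)
--     if n >= 6: b_win_immed -= math.comb(n-3,n//2-3)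
--
--
--     a,b,d = solve(n-4)
--
--     b_wins = (b_win_immed + b) % MOD
--     a_wins = ((ways - b_wins - 1) % MOD + MOD) % MOD
--     d = d
--
--     return a_wins, b_wins, d
-- ===== SOURCE B (Python) =====
-- # B: replaces A's recursion with one bottom-up prefix sum: the b-component is just
-- # the sum of the per-level "immediate B win" terms, and the a-component depends only
-- # on the top-level binomial, so no per-level (a, b, d) triple has to be threaded.
-- import math
--
-- MOD = 998244353
--
-- def solve(n):
--     if n == 0:
--         return 0, 0, 1
--     if n == 2:
--         return 1, 0, 1
--     b = 0
--     m = 6 if n % 4 == 2 else 4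
--     while m <= n:
--         b += 2 * math.comb(m - 2, m // 2 - 2)
--         if m >= 6:
--             b -= math.comb(m - 3, m // 2 - 3)
--         m += 4
--     b %= MOD
--     a = (math.comb(n, n // 2) - b - 1) % MOD
--     return a, b, 1
-- ===== Notes on version B (the rewrite author's own statement) =====
-- stated objective: simpler
-- what changed: A threads an (a_wins, b_wins, draws) triple through a recursion in steps of 4; B notes that the b-component is just a prefix sum of the per-level immediate-win terms and the a-component depends only on the top-level binomial, so it runs one bottom-up while loop accumulating that sum and computes a once at the end, skipping A's per-level central binomial and its unused a_gets_n binomial.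
import Mathlib
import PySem

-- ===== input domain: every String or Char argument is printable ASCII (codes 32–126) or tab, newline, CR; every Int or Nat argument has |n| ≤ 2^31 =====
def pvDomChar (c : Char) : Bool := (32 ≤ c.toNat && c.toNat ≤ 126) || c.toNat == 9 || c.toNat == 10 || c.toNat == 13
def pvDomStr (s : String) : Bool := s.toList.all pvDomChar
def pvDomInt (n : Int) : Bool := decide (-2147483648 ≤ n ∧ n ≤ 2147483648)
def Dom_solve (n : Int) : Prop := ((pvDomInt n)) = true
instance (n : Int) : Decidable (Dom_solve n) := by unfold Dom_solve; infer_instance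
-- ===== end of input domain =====

-- B replaces A's recursion by a single bottom-up prefix-sum loop over the per-level
-- "immediate B win" terms; the a-component is computed once from the top binomial.

-- ===== PORT A =====
def pMOD : Int := 998244353

-- math.comb n k; Python raises ValueError when n < 0 or k < 0 (unreachable under Pre_)
def pycomb (n k : Int) : Int :=
  if n < 0 ∨ k < 0 then 0 else (Nat.choose n.toNat k.toNat : Int)

def solve (n : Int) : Int × Int × Int :=
  if _h0 : n = 0 then (0, 0, 1)
  else if _h2 : n = 2 then (1, 0, 1)
  else if _h4 : n < 4 then (0, 0, 0)  -- Python recurses forever here (RecursionError); outside Pre_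
  else
    let ways := pycomb n (PySem.Int.floordiv n 2)
    let _aGetsN := pycomb (n - 1) (PySem.Int.floordiv n 2 - 1)  -- computed and unused, as in A
    let bImm0 := 2 * pycomb (n - 2) (PySem.Int.floordiv n 2 - 2)
    let bImm := if 6 ≤ n then bImm0 - pycomb (n - 3) (PySem.Int.floordiv n 2 - 3) else bImm0
    let r := solve (n - 4)
    let bWins := PySem.Int.mod (bImm + r.2.1) pMOD
    let aWins := PySem.Int.mod (PySem.Int.mod (ways - bWins - 1) pMOD + pMOD) pMOD
    (aWins, bWins, r.2.2)
termination_by n.toNat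
decreasing_by omega

-- ===== PORT B =====
-- the while loop of Source B: m runs start, start+4, … while m ≤ n, accumulating b
def solveAltLoop (m n b : Int) : Int :=
  if hle : m ≤ n then
    let b1 := b + 2 * pycomb (m - 2) (PySem.Int.floordiv m 2 - 2)
    let b2 := if 6 ≤ m then b1 - pycomb (m - 3) (PySem.Int.floordiv m 2 - 3) else b1
    solveAltLoop (m + 4) n b2
  else b
termination_by (n + 4 - m).toNat
decreasing_by omega

def solve_alt (n : Int) : Int × Int × Int :=
  if n = 0 then (0, 0, 1)
  else if n = 2 then (1, 0, 1)
  else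
    let start := if PySem.Int.mod n 4 = 2 then (6 : Int) else 4
    let b := PySem.Int.mod (solveAltLoop start n 0) pMOD
    let a := PySem.Int.mod (pycomb n (PySem.Int.floordiv n 2) - b - 1) pMOD
    (a, b, 1)

-- ===== PRECONDITION & SPEC =====
-- Pre_ excludes odd and negative n, where A recurses past its base cases forever
-- (RecursionError), and even n > 3900, where A exceeds CPython's default recursion
-- limit and raises RecursionError as well (measured: A fails at n = 4000).
def Pre_solve (n : Int) : Prop := 0 ≤ n ∧ PySem.Int.mod n 2 = 0 ∧ n ≤ 3900
instance (n : Int) : Decidable (Pre_solve n) := by unfold Pre_solve; infer_instance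
def pvWitness_solve : Int := 8

def Spec_solve (n : Int) (out : Int × Int × Int) : Prop := out = solve_alt n
instance (n : Int) (out : Int × Int × Int) : Decidable (Spec_solve n out) := by unfold Spec_solve; infer_instance

-- ===== CLAIM (what is proved, stated in full; the proofs are below) =====
def Claim_equal_solve : Prop := ∀ (n : Int), Dom_solve n → Pre_solve n → Spec_solve n (solve n)

-- ===== LEMMAS AND PROOFS =====

theorem modM (x : Int) : PySem.Int.mod x 998244353 = x % 998244353 :=
  PySem.Int.mod_eq_emod_of_pos (by decide)

-- the per-level term both programs add to the b accumulator
def bwTerm (m : Int) : Int :=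
  if 6 ≤ m then 2 * pycomb (m - 2) (PySem.Int.floordiv m 2 - 2) - pycomb (m - 3) (PySem.Int.floordiv m 2 - 3)
  else 2 * pycomb (m - 2) (PySem.Int.floordiv m 2 - 2)

theorem solveAltLoop_stop (m n b : Int) (h : n < m) : solveAltLoop m n b = b := by
  rw [solveAltLoop.eq_def, dif_neg (by omega : ¬ m ≤ n)]

theorem solveAltLoop_peel (k : Nat) : ∀ (m n b : Int), n - m = 4 * k →
    solveAltLoop m n b = solveAltLoop m (n - 4) b + bwTerm n := by
  induction k with
  | zero =>
    intro m n b h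
    have hm : m = n := by omega
    subst hm
    rw [solveAltLoop.eq_def, dif_pos (le_refl m)]
    rw [solveAltLoop_stop _ _ _ (by omega), solveAltLoop_stop _ _ _ (by omega)]
    unfold bwTerm
    split <;> ring
  | succ k ih =>
    intro m n b h
    have h2 : m ≤ n - 4 := by omega
    have h1 : m ≤ n := by omega
    rw [solveAltLoop.eq_def, dif_pos h1]
    conv_rhs => rw [solveAltLoop.eq_def, dif_pos h2]
    exact ih (m + 4) n _ (by omega)

-- characterisation of Source B's b-component, uniform over the base cases
theorem solve_alt_b (n : Int) (h0 : 0 ≤ n) :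
    (solve_alt n).2.1 = PySem.Int.mod (solveAltLoop (if PySem.Int.mod n 4 = 2 then 6 else 4) n 0) pMOD := by
  unfold solve_alt
  by_cases hn0 : n = 0
  · subst hn0
    rw [if_pos rfl]
    rw [solveAltLoop_stop _ _ _ (by split <;> omega)]
    norm_num [pMOD, modM]
  · by_cases hn2 : n = 2
    · subst hn2
      rw [if_neg (by norm_num), if_pos rfl]
      rw [solveAltLoop_stop _ _ _ (by split <;> omega)]
      norm_num [pMOD, modM]
    · rw [if_neg hn0, if_neg hn2]

-- the d-component of A is 1 on even nonnegative n
theorem solve_d (k : Nat) : ∀ (n : Int), n = 2 * (k : Int) → (solve n).2.2 = 1 := by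
  induction k using Nat.strong_induction_on with
  | _ k ih =>
    intro n hn
    rw [solve.eq_def]
    by_cases h0 : n = 0
    · simp [h0]
    · by_cases h2 : n = 2
      · simp [h2]
      · have h4 : ¬ n < 4 := by omega
        rw [dif_neg h0, dif_neg h2, dif_neg h4]
        exact ih (k - 2) (by omega) (n - 4) (by omega)

-- main equivalence on even nonnegative n
theorem solve_eq (k : Nat) : ∀ (n : Int), n = 2 * (k : Int) → solve n = solve_alt n := by
  induction k using Nat.strong_induction_on with
  | _ k ih =>
    intro n hn
    by_cases h0 : n = 0
    · subst h0; rw [solve.eq_def, solve_alt]; norm_num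
    · by_cases h2 : n = 2
      · subst h2; rw [solve.eq_def, solve_alt]; norm_num
      · have h4 : 4 ≤ n := by omega
        have hprevd : (solve (n - 4)).2.2 = 1 := solve_d (k - 2) (n - 4) (by omega)
        have hmod4 : PySem.Int.mod n 4 = n % 4 := PySem.Int.mod_eq_emod_of_pos (by norm_num)
        have hmod4' : PySem.Int.mod (n - 4) 4 = (n - 4) % 4 := PySem.Int.mod_eq_emod_of_pos (by norm_num)
        set s : Int := if PySem.Int.mod n 4 = 2 then (6 : Int) else 4 with hs
        have hss : (PySem.Int.mod (n - 4) 4 = 2 → s = 6) ∧ (¬ PySem.Int.mod (n - 4) 4 = 2 → s = 4) := by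
          constructor <;> intro hc <;> rw [hs] <;> rw [hmod4'] at hc <;> rw [hmod4]
          · rw [if_pos (by omega)]
          · rw [if_neg (by omega)]
        have hprevb : (solve (n - 4)).2.1 = PySem.Int.mod (solveAltLoop s (n - 4) 0) pMOD := by
          rw [ih (k - 2) (by omega) (n - 4) (by omega)]
          rw [solve_alt_b (n - 4) (by omega)]
          by_cases hc : PySem.Int.mod (n - 4) 4 = 2
          · rw [if_pos hc, hss.1 hc]
          · rw [if_neg hc, hss.2 hc]
        have hsn : s ≤ n ∧ (n - s) % 4 = 0 := by
          have he : n % 2 = 0 := by omega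
          rw [hs, hmod4]
          rcases (by omega : n % 4 = 0 ∨ n % 4 = 2) with h | h
          · rw [if_neg (by omega)]; omega
          · rw [if_pos (by omega)]
            constructor
            · have : n ≠ 2 := h2
              omega
            · omega
        have hpeel : solveAltLoop s n 0 = solveAltLoop s (n - 4) 0 + bwTerm n := by
          refine solveAltLoop_peel ((n - s) / 4).toNat s n 0 ?_
          omega
        -- unfold both sides
        rw [solve.eq_def, dif_neg h0, dif_neg h2, dif_neg (by omega : ¬ n < 4)]
        rw [solve_alt.eq_def, if_neg h0, if_neg h2]
        rw [← hs]
        have hbw : (if 6 ≤ n then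
              2 * pycomb (n - 2) (PySem.Int.floordiv n 2 - 2) - pycomb (n - 3) (PySem.Int.floordiv n 2 - 3)
            else 2 * pycomb (n - 2) (PySem.Int.floordiv n 2 - 2)) = bwTerm n := by
          unfold bwTerm; split <;> ring
        dsimp only
        rw [hprevb, hprevd, hpeel, hbw]
        refine Prod.ext ?_ (Prod.ext ?_ rfl)
        · dsimp only
          simp only [pMOD, modM]
          omega
        · dsimp only
          simp only [pMOD, modM]
          omega

-- ===== VERDICT (by name: the statement is the Claim_ definition above) =====
theorem solve_spec : Claim_equal_solve := by
  intro n _ hpre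
  obtain ⟨hge, he, _⟩ := hpre
  rw [PySem.Int.mod_eq_emod_of_pos (by norm_num)] at he
  exact solve_eq (n / 2).toNat n (by omega)
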